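-- pv_equiv track=rewrite | github.com/icerovski/Python_Fundamentals | Unit_07/Text_11.py | pyramidic
-- ===== SOURCE A (Python) =====
-- def pyramidic(k, base, input_list):
--     # Base Case
--     if input_list == []:
--         return base
--
--     # Recursive Case
--     else:
--         smaller_list = input_list[1:]
--
--         if k in input_list[0].keys() and input_list[0][k] >= base + 2:
--             return pyramidic(k, base + 2, smaller_list)
--         else:
--             return pyramidic(k, base, smaller_list)
-- ===== SOURCE B (Python) =====
-- def pyramidic(k, base, input_list):
--     for d in input_list:
--         if k in d and d[k] >= base + 2:
--             base += 2
--     return base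
-- ===== Notes on version B (the rewrite author's own statement) =====
-- stated objective: simpler
-- what changed: Replaced the tail-slice recursion with a single iterative pass that threads the accumulator through a for loop.
import Mathlib
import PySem

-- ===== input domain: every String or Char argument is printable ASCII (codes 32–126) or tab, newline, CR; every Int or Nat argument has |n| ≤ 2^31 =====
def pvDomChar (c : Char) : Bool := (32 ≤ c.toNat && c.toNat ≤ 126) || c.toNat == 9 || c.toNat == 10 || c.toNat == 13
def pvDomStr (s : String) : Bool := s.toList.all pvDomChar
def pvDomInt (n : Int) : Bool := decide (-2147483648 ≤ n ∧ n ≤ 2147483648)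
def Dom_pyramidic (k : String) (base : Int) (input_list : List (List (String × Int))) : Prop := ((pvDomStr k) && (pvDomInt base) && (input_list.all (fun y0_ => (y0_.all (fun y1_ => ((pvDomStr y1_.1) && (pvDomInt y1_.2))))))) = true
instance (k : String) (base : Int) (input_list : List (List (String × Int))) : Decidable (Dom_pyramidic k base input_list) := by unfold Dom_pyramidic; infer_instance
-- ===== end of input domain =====

-- B replaces the tail-slice recursion with a single iterative accumulator pass (simpler).
-- ===== PORT A =====
def pyramidic (k : String) (base : Int) (input_list : List (List (String × Int))) : Int :=
  match input_list with
  | [] => base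
  | d0 :: rest =>
    -- smaller_list = input_list[1:]
    let smaller_list := PySem.List.slice (d0 :: rest) (some 1) none
    match (PySem.Dict.mk d0).get? k with   -- `k in d.keys() and d[k] >= base + 2` (short-circuit `and`)
    | some v => if v ≥ base + 2 then pyramidic k (base + 2) smaller_list else pyramidic k base smaller_list
    | none => pyramidic k base smaller_list
  termination_by input_list.length
  decreasing_by all_goals simp [PySem.List.slice_from_one]

-- ===== PORT B =====
def pyramidic_alt (k : String) (base : Int) (input_list : List (List (String × Int))) : Int :=
  input_list.foldl
    (fun base d =>
      match (PySem.Dict.mk d).get? k with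
      | some v => if v ≥ base + 2 then base + 2 else base
      | none => base)
    base

-- ===== PRECONDITION & SPEC =====
def Spec_pyramidic (k : String) (base : Int) (input_list : List (List (String × Int))) (out : Int) : Prop := out = pyramidic_alt k base input_list
instance (k : String) (base : Int) (input_list : List (List (String × Int))) (out : Int) : Decidable (Spec_pyramidic k base input_list out) := by unfold Spec_pyramidic; infer_instance

-- ===== CLAIM (what is proved, stated in full; the proofs are below) =====
def Claim_equal_pyramidic : Prop := ∀ (k : String) (base : Int) (input_list : List (List (String × Int))), Dom_pyramidic k base input_list → Spec_pyramidic k base input_list (pyramidic k base input_list)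

-- ===== LEMMAS AND PROOFS =====

-- ===== VERDICT (by name: the statement is the Claim_ definition above) =====
theorem pyramidic_agree (k : String) (base : Int) (l : List (List (String × Int))) :
    pyramidic k base l = pyramidic_alt k base l := by
  induction l generalizing base with
  | nil => simp [pyramidic, pyramidic_alt]
  | cons d rest ih =>
    rw [pyramidic]
    have hs : PySem.List.slice (d :: rest) (some 1) none = rest := by
      simp [PySem.List.slice_from_one]
    rw [hs]
    cases h : (PySem.Dict.mk d).get? k with
    | none => simp [pyramidic_alt, h, ih]
    | some v =>
      by_cases hv : v ≥ base + 2 <;> simp [pyramidic_alt, h, hv, ih]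

theorem pyramidic_spec : Claim_equal_pyramidic := by
  intro k base l _
  unfold Spec_pyramidic
  exact pyramidic_agree k base l
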